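-- pv_equiv track=rewrite | github.com/lsbardel/mathfun | extra/sum_power_two.py | pow2combos
-- ===== SOURCE A (Python) =====
-- def pow2combos(n):
--     c = 1
--     p = 1
--     while n > 1:
--         c += 1
--         n //= 2
--         if not n % 2:
--             c += 1
--     return c
-- ===== SOURCE B (Python) =====
-- def pow2combos(n):
--     if n <= 1:
--         return 1
--     return 1 + 2 * (n.bit_length() - 1) - bin(n).count('1') + (n & 1)
-- ===== Notes on version B (the rewrite author's own statement) =====
-- stated objective: simpler
-- what changed: Replaces the bit-halving while loop with a loop-free closed form over bit_length, popcount and parity, guarding the degenerate inputs on which the loop never runs.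
import Mathlib
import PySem

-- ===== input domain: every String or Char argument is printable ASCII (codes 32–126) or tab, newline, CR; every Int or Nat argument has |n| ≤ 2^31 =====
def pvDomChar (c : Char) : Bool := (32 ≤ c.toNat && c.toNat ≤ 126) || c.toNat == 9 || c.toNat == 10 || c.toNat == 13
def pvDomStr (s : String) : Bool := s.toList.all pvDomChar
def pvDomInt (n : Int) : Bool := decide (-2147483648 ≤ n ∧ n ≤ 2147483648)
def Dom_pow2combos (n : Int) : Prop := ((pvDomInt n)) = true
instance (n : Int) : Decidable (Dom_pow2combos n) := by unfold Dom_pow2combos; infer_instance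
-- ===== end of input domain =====

-- B replaces A's bit-halving while loop with a closed form over bit_length and popcount (objective: simpler).

-- ===== PORT A =====
-- the while loop of A: state (n, c); p is dead in A and dropped
def pow2combosGo (n c : Int) : Int :=
  if _h : n > 1 then
    let n' := PySem.Int.floordiv n 2
    pow2combosGo n' (if PySem.Int.mod n' 2 = 0 then c + 2 else c + 1)
  else c
termination_by n.toNat
decreasing_by
  simp only [PySem.Int.floordiv_eq_ediv_of_pos (by omega : (0:Int) < 2)]
  omega

def pow2combos (n : Int) : Int := pow2combosGo n 1

-- ===== PORT B =====
-- int.bit_length() of a nonnegative integer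
def pvBitLen (m : Nat) : Nat :=
  if m = 0 then 0 else pvBitLen (m / 2) + 1

-- bin(m).count('1') of a nonnegative integer (popcount)
def pvPopCount (m : Nat) : Nat :=
  if m = 0 then 0 else pvPopCount (m / 2) + m % 2

def pow2combos_alt (n : Int) : Int :=
  if n ≤ 1 then 1
  else 1 + 2 * ((pvBitLen n.toNat : Int) - 1) - (pvPopCount n.toNat : Int) + ((n.toNat % 2 : Nat) : Int)

-- ===== PRECONDITION & SPEC =====
def Spec_pow2combos (n : Int) (out : Int) : Prop := out = pow2combos_alt n
instance (n : Int) (out : Int) : Decidable (Spec_pow2combos n out) := by unfold Spec_pow2combos; infer_instance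

-- ===== CLAIM (what is proved, stated in full; the proofs are below) =====
def Claim_equal_pow2combos : Prop := ∀ (n : Int), Dom_pow2combos n → Spec_pow2combos n (pow2combos n)

-- ===== LEMMAS AND PROOFS =====

theorem pvBitLen_zero : pvBitLen 0 = 0 := by unfold pvBitLen; norm_num
theorem pvBitLen_one : pvBitLen 1 = 1 := by unfold pvBitLen; norm_num [pvBitLen_zero]
theorem pvBitLen_two : pvBitLen 2 = 2 := by unfold pvBitLen; norm_num [pvBitLen_one]
theorem pvBitLen_three : pvBitLen 3 = 2 := by unfold pvBitLen; norm_num [pvBitLen_one]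
theorem pvPopCount_zero : pvPopCount 0 = 0 := by unfold pvPopCount; norm_num
theorem pvPopCount_one : pvPopCount 1 = 1 := by unfold pvPopCount; norm_num [pvPopCount_zero]
theorem pvPopCount_two : pvPopCount 2 = 1 := by unfold pvPopCount; norm_num [pvPopCount_one]
theorem pvPopCount_three : pvPopCount 3 = 2 := by unfold pvPopCount; norm_num [pvPopCount_one]

theorem pvBitLen_step (k : Nat) (hk : k ≠ 0) : pvBitLen k = pvBitLen (k / 2) + 1 := by
  conv_lhs => rw [pvBitLen]
  simp [hk]

theorem pvPopCount_step (k : Nat) (hk : k ≠ 0) : pvPopCount k = pvPopCount (k / 2) + k % 2 := by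
  conv_lhs => rw [pvPopCount]
  simp [hk]

theorem go_closed : ∀ k : Nat, ∀ n c : Int, 1 < n → n.toNat = k →
    pow2combosGo n c =
      c + 2 * ((pvBitLen k : Int) - 1) - (pvPopCount k : Int) + ((k % 2 : Nat) : Int) := by
  intro k
  induction k using Nat.strong_induction_on with
  | _ k ih =>
    intro n c hn hk
    rw [pow2combosGo]
    simp only [hn, dif_pos]
    have h2 : (0:Int) < 2 := by omega
    rw [PySem.Int.floordiv_eq_ediv_of_pos h2, PySem.Int.mod_eq_emod_of_pos h2]
    set n' := n / 2 with hn'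
    have hk2 : n'.toNat = k / 2 := by omega
    have hkge : 2 ≤ k := by omega
    by_cases hbig : 1 < n'
    · -- recursive case
      have := ih (k / 2) (by omega) n'
      have hmod : n' % 2 = ((k / 2 % 2 : Nat) : Int) := by omega
      rw [pvBitLen_step k (by omega), pvPopCount_step k (by omega)]
      by_cases he : n' % 2 = 0
      · rw [if_pos he]
        rw [this (c + 2) hbig hk2]
        have : k / 2 % 2 = 0 := by omega
        push_cast [this]
        ring
      · rw [if_neg he]
        rw [this (c + 1) hbig hk2]
        have : k / 2 % 2 = 1 := by omega
        push_cast [this]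
        ring
    · -- n' = 1, i.e. k = 2 or k = 3
      have hn1 : n' = 1 := by omega
      have hmod : ¬ (n' % 2 = 0) := by omega
      rw [if_neg hmod, pow2combosGo, dif_neg (by omega : ¬ n' > 1)]
      have : k = 2 ∨ k = 3 := by omega
      rcases this with h | h <;> subst h
      · rw [pvBitLen_two, pvPopCount_two]
        push_cast; ring
      · rw [pvBitLen_three, pvPopCount_three]
        push_cast; ring

-- ===== VERDICT (by name: the statement is the Claim_ definition above) =====
theorem pow2combos_spec : Claim_equal_pow2combos := by
  intro n _
  unfold Spec_pow2combos pow2combos pow2combos_alt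
  by_cases h : n ≤ 1
  · rw [pow2combosGo, dif_neg (by omega : ¬ n > 1), if_pos h]
  · rw [if_neg h, go_closed n.toNat n 1 (by omega) rfl]
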